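-- pv_equiv track=rewrite | github.com/RobertAndion/Discord_Music_Bot | fileProcessing.py | page_format
-- ===== SOURCE A (Python) =====
-- def page_format(raw_input) -> list:
--     list_collection = []
--     i = 0
--     temp = ''
--     for song in raw_input.splitlines():
--         temp = temp + '\n' + song
--         i = i + 1
--         if i % 10 == 0:
--             list_collection.append(temp)
--             temp = ''
--
--     if i % 10 != 0:
--         list_collection.append(temp)
--     return list_collection
-- ===== SOURCE B (Python) =====
-- def page_format(raw_input) -> list:
--     def chunks(rest):
--         if not rest:
--             return []
--         return ['\n' + '\n'.join(rest[:10])] + chunks(rest[10:])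
--     return chunks(raw_input.splitlines())
-- ===== Notes on version B (the rewrite author's own statement) =====
-- stated objective: simpler
-- what changed: Replaces the running counter i, the temp string accumulator and the separate trailing-append guard with a direct recursive chunker that slices ten lines at a time and joins each slice.
import Mathlib
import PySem

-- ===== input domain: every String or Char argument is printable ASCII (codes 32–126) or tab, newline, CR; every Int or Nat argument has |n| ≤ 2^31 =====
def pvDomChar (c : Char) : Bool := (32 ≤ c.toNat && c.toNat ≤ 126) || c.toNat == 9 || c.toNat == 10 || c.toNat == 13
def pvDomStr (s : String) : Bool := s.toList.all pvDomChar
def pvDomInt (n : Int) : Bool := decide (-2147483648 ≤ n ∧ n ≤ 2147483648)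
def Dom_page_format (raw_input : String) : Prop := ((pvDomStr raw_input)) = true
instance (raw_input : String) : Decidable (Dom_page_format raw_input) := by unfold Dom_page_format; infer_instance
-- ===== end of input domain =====

-- B replaces A's running counter, temp accumulator and trailing-append guard with a
-- recursive ten-line chunker (slice + join); objective: simpler. A = B on all inputs.

-- ===== PORT A =====
-- loop body of A: state (list_collection, i, temp)
def pageStep (st : List String × Int × String) (song : String) : List String × Int × String :=
  let temp := st.2.2 ++ "\n" ++ song
  let i := st.2.1 + 1
  if PySem.Int.mod i 10 = 0 then (st.1 ++ [temp], i, "") else (st.1, i, temp)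

def page_format (raw_input : String) : List String :=
  let r := (PySem.Str.splitlines raw_input).foldl pageStep ([], 0, "")
  if PySem.Int.mod r.2.1 10 ≠ 0 then r.1 ++ [r.2.2] else r.1

-- ===== PORT B =====
-- hand port of Python's '\n'.join (exact: sep between consecutive elements)
def joinNL : List String → String
  | [] => ""
  | [s] => s
  | s :: t :: rest => s ++ "\n" ++ joinNL (t :: rest)

def chunksB (l : List String) : List String :=
  match l with
  | [] => []
  | x :: rest =>
      ("\n" ++ joinNL (PySem.List.slice (x :: rest) none (some 10)))
        :: chunksB (PySem.List.slice (x :: rest) (some 10) none)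
termination_by l.length
decreasing_by
  rw [PySem.List.slice_from _ (by norm_num)]
  simp

def page_format_alt (raw_input : String) : List String :=
  chunksB (PySem.Str.splitlines raw_input)

-- ===== PRECONDITION & SPEC =====
def Spec_page_format (raw_input : String) (out : List String) : Prop := out = page_format_alt raw_input
instance (raw_input : String) (out : List String) : Decidable (Spec_page_format raw_input out) := by unfold Spec_page_format; infer_instance

-- ===== CLAIM (what is proved, stated in full; the proofs are below) =====
def Claim_equal_page_format : Prop := ∀ (raw_input : String), Dom_page_format raw_input → Spec_page_format raw_input (page_format raw_input)

-- ===== LEMMAS AND PROOFS =====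

-- A's final "append the leftover temp" step
def finalizeA (r : List String × Int × String) : List String :=
  if PySem.Int.mod r.2.1 10 ≠ 0 then r.1 ++ [r.2.2] else r.1

-- reference chunker: r lines already accumulated in temp
def chunkFrom (r : Nat) (temp : String) : List String → List String
  | [] => if r = 0 then [] else [temp]
  | s :: rest =>
      if r + 1 = 10 then (temp ++ "\n" ++ s) :: chunkFrom 0 "" rest
      else chunkFrom (r + 1) (temp ++ "\n" ++ s) rest

-- concatenation of "\n" ++ x over a list
def prefixNL : List String → String
  | [] => ""
  | s :: rest => "\n" ++ s ++ prefixNL rest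

theorem joinNL_eq_prefixNL (s : String) (l : List String) :
    joinNL (s :: l) = s ++ prefixNL l := by
  induction l generalizing s with
  | nil => simp [joinNL, prefixNL]
  | cons t rest ih => simp [joinNL, prefixNL, ih, String.append_assoc]

theorem loopA (l : List String) (acc : List String) (i : Int) (temp : String) (hi : 0 ≤ i) :
    finalizeA (l.foldl pageStep (acc, i, temp))
      = acc ++ chunkFrom (PySem.Int.mod i 10).toNat temp l := by
  have hm : ∀ a : Int, PySem.Int.mod a 10 = a % 10 :=
    fun a => PySem.Int.mod_eq_emod_of_pos (by norm_num)
  induction l generalizing acc i temp with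
  | nil =>
      simp only [List.foldl_nil, finalizeA, chunkFrom, hm]
      by_cases h : i % 10 = 0
      · simp [h]
      · have h0 : ¬ (i % 10).toNat = 0 := by omega
        simp [h, h0]
  | cons s rest ih =>
      simp only [List.foldl_cons, pageStep, hm]
      by_cases h : (i + 1) % 10 = 0
      · rw [if_pos h, ih _ _ _ (by omega)]
        simp only [chunkFrom, hm]
        rw [if_pos (by omega : (i % 10).toNat + 1 = 10)]
        rw [(by omega : ((i + 1) % 10).toNat = 0)]
        simp [List.append_assoc]
      · rw [if_neg h, ih _ _ _ (by omega)]
        simp only [chunkFrom, hm]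
        rw [if_neg (by omega : ¬ ((i % 10).toNat + 1 = 10))]
        rw [(by omega : ((i + 1) % 10).toNat = (i % 10).toNat + 1)]

theorem chunkFrom_pos (l : List String) (r : Nat) (temp : String) (h0 : 0 < r) (h10 : r < 10) :
    chunkFrom r temp l =
      if l.length ≤ 10 - r then [temp ++ prefixNL l]
      else (temp ++ prefixNL (l.take (10 - r))) :: chunkFrom 0 "" (l.drop (10 - r)) := by
  induction l generalizing r temp with
  | nil =>
      rw [if_pos (by simp)]
      simp only [chunkFrom]
      rw [if_neg (by omega)]
      simp [prefixNL]
  | cons s rest ih =>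
      simp only [chunkFrom]
      by_cases h : r + 1 = 10
      · have hr : r = 9 := by omega
        subst hr
        rw [if_pos h]
        by_cases hrest : rest = []
        · subst hrest
          rw [if_pos (by simp)]
          simp [chunkFrom, prefixNL, String.append_assoc]
        · have hl : 0 < rest.length := List.length_pos_iff.mpr hrest
          rw [if_neg (by simp; omega)]
          simp [prefixNL, String.append_assoc]
      · rw [if_neg h, ih _ _ (by omega) (by omega)]
        have h1 : 10 - 9 = 1 := rfl
        by_cases hlen : rest.length ≤ 10 - (r + 1)
        · rw [if_pos hlen, if_pos (by simp; omega)]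
          simp [prefixNL, String.append_assoc]
        · rw [if_neg hlen, if_neg (by simp; omega),
            (by omega : 10 - r = (10 - (r + 1)) + 1)]
          simp [prefixNL, String.append_assoc]

theorem chunkFrom_zero_eq_chunksB (l : List String) :
    chunkFrom 0 "" l = chunksB l := by
  induction l using chunksB.induct with
  | case1 => simp [chunkFrom, chunksB]
  | case2 x rest ih =>
      rw [chunksB]
      rw [PySem.List.slice_to _ (by norm_num), PySem.List.slice_from _ (by norm_num)]
      rw [PySem.List.slice_from _ (by norm_num)] at ih
      have h10 : ((10:Int).toNat) = 10 := rfl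
      rw [h10] at ih ⊢
      simp only [chunkFrom]
      rw [if_neg (by omega)]
      rw [chunkFrom_pos _ 1 _ (by norm_num) (by norm_num)]
      by_cases hlen : rest.length ≤ 9
      · rw [if_pos (by omega)]
        have hd : (x :: rest).drop 10 = [] := by
          apply List.drop_eq_nil_of_le; simp; omega
        have ht : (x :: rest).take 10 = x :: rest := by
          apply List.take_of_length_le; simp; omega
        rw [hd, ht]
        simp [chunksB, joinNL_eq_prefixNL, String.append_assoc, String.empty_append]
      · rw [if_neg (by omega)]
        rw [show (10:Nat) = 9 + 1 from rfl, List.take_succ_cons, List.drop_succ_cons] at *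
        rw [ih]
        simp [joinNL_eq_prefixNL, String.append_assoc, String.empty_append]

-- ===== VERDICT (by name: the statement is the Claim_ definition above) =====
theorem page_format_spec : Claim_equal_page_format := by
  intro raw _
  show page_format raw = page_format_alt raw
  have h : page_format raw
      = finalizeA ((PySem.Str.splitlines raw).foldl pageStep ([], 0, "")) := rfl
  rw [h, loopA _ _ _ _ le_rfl]
  rw [PySem.Int.mod_eq_emod_of_pos (by norm_num)]
  simpa [page_format_alt] using chunkFrom_zero_eq_chunksB (PySem.Str.splitlines raw)
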